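-- pv_equiv track=rewrite | github.com/JLDEMIGUEL/Topologia | SimplicialComplex/utils/simplicial_complex_utils.py | reachable_alg
-- ===== SOURCE A (Python) =====
-- def reachable(edges: list | set | tuple, vert: int, visited_vertex: dict) -> list:
--     """
--     Returns a list with the reachable vertex from the given vertex in a graph.
--     Args:
--         edges (list | set | tuple): list of edges
--         visited_vertex (dict): dict with the visited vertex
--         vert (int): entry vertex to get the list of reachable vertex
--     Returns:
--         list: list of reachable vertex from the given vertex
--     """
--     reach = [vert]
--     visited_vertex[vert] = True
--     for edge in edges:
--         if vert in edge:
--             end_vert = tuple(x for x in edge if x != vert)[0]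
--             if not visited_vertex[end_vert]:
--                 reach = reach + reachable(edges, end_vert, visited_vertex)
--     return reach
--
-- def reachable_alg(edges: list | set | tuple, vert: int, visited_vertex: dict) -> list:
--     """
--     Returns a list with the reachable vertex from the given vertex.
--     Args:
--         edges (list | set | tuple): list of edges
--         visited_vertex (dict): dict with the visited vertex
--         vert (int): entry vertex to get the list of reachable vertex
--     Returns:
--         list: list of reachable vertex from the given vertex
--     """
--     reach = [vert]
--     visited_vertex[vert] = True
--     for edge in edges:
--         if vert in edge:
--             tup = tuple(x for x in edge if x != vert)
--             end_vertex = tup[0]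
--             if not visited_vertex[end_vertex]:
--                 reach = reach + reachable(edges, end_vertex, visited_vertex)
--     return reach
-- ===== SOURCE B (Python) =====
-- def reachable_alg(edges, vert, visited_vertex):
--     # Iterative DFS with an explicit stack over an adjacency dict built once, instead of
--     # A's recursion that rescans the whole edge list at every visited vertex.
--     adj = {}
--     for a, b in edges:
--         adj.setdefault(a, []).append(b)
--         adj.setdefault(b, []).append(a)
--     # a vertex may be entered iff its flag is False; the start vertex is always reported
--     avail = {k for k, flag in visited_vertex.items() if not flag}
--     avail.add(vert)
--     order = []
--     stack = [vert]
--     while stack: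
--         v = stack.pop()
--         if v not in avail:
--             continue
--         avail.discard(v)
--         visited_vertex[v] = True
--         order.append(v)
--         stack.extend(reversed(adj.get(v, [])))
--     return order
-- ===== Notes on version B (the rewrite author's own statement) =====
-- stated objective: alternative
-- what changed: B replaces A's recursion, which rescans the entire edge list at every visited vertex, by an iterative DFS with an explicit stack over an adjacency dict built once.
import Mathlib
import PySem

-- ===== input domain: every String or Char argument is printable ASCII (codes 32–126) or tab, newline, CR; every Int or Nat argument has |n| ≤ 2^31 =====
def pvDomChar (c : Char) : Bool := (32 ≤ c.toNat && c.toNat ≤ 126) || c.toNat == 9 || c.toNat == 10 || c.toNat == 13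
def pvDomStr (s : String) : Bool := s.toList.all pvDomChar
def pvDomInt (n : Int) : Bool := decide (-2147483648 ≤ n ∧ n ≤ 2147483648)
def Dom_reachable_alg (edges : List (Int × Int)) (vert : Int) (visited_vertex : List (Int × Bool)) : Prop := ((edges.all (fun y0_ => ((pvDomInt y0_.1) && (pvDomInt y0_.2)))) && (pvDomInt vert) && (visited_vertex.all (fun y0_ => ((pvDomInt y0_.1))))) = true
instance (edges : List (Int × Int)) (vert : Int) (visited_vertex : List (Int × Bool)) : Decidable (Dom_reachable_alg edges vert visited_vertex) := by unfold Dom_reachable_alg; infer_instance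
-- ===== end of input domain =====

-- B replaces A's recursion (which rescans the whole edge list at every visited vertex) by an
-- iterative DFS with an explicit stack over an adjacency dict built once (objective:
-- alternative). Both A and B mutate the Python visited_vertex dict identically (marking every
-- reported vertex True); the equivalence proved here is about the return value.

-- ===== PORT A =====
-- tuple(x for x in edge if x != vert)
def pvTup (edge : Int × Int) (vert : Int) : List Int :=
  (if edge.1 ≠ vert then [edge.1] else []) ++ (if edge.2 ≠ vert then [edge.2] else [])

-- body of A's `for edge in edges` loop (rec = the recursive call on the remaining fuel)
def pvBodyA (rec : Int → PySem.Dict Int Bool → List Int × PySem.Dict Int Bool) (vert : Int)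
    (st : List Int × PySem.Dict Int Bool) (edge : Int × Int) : List Int × PySem.Dict Int Bool :=
  if edge.1 = vert ∨ edge.2 = vert then
    match PySem.List.pyGet? (pvTup edge vert) 0 with
    | none => st        -- Python: IndexError (self-loop); excluded by Pre_
    | some e =>
      match st.2.get? e with
      | none => st      -- Python: KeyError (endpoint not a key); excluded by Pre_
      | some b =>
        if b = false then
          let p := rec e st.2
          (st.1 ++ p.1, p.2)
        else st
  else st

-- the recursion threads the (mutated) visited dict; fuel is a totality guard only —
-- inside Pre_ the recursion depth is bounded by the number of dict keys + 1 < fuel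
def reachableA : Nat → List (Int × Int) → Int → PySem.Dict Int Bool → List Int × PySem.Dict Int Bool
  | 0, _, _, vis => ([], vis)
  | fuel+1, edges, vert, vis =>
    edges.foldl (pvBodyA (reachableA fuel edges) vert) ([vert], vis.insert vert true)

def reachable_alg (edges : List (Int × Int)) (vert : Int) (visited_vertex : List (Int × Bool)) : List Int :=
  (reachableA (visited_vertex.length + edges.length + 2) edges vert (PySem.Dict.ofList visited_vertex)).1

-- ===== PORT B =====
-- adjacency dict: adj.setdefault(a, []).append(b) twice per edge, i.e. Dict.modify with (· ++ [y])
def pvAdj (edges : List (Int × Int)) : PySem.Dict Int (List Int) :=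
  edges.foldl (fun d e => (d.modify e.1 [] (· ++ [e.2])).modify e.2 [] (· ++ [e.1])) PySem.Dict.empty

-- avail = {k for k, flag in visited_vertex.items() if not flag}; avail.add(vert)
def pvAvail (visited_vertex : List (Int × Bool)) (vert : Int) : PySem.Set Int :=
  (PySem.Set.ofList (((PySem.Dict.ofList visited_vertex).items.filter (fun kv => !kv.2)).map Prod.fst)).add vert

-- the while loop over the stack; `pending` is the stack read top-first, so Python's
-- stack.extend(reversed(adj.get(v, []))) followed by pops yields pending = adj[v] ++ rest.
-- fuel is a totality guard only, decremented once per visit (visits ≤ |avail|).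
def pvLoop (adj : PySem.Dict Int (List Int)) : Nat → List Int → PySem.Set Int → List Int
  | _, [], _ => []
  | fuel, v :: rest, avail =>
    if avail.contains v then
      match fuel with
      | 0 => []
      | f+1 => v :: pvLoop adj f (adj.getD v [] ++ rest) (avail.discard v)
    else pvLoop adj fuel rest avail
termination_by fuel pending _ => (fuel, pending.length)

def reachable_alg_alt (edges : List (Int × Int)) (vert : Int) (visited_vertex : List (Int × Bool)) : List Int :=
  pvLoop (pvAdj edges) (visited_vertex.length + 2) [vert] (pvAvail visited_vertex vert)

-- ===== PRECONDITION & SPEC =====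
-- each edge (a,b) seen from both ends
def pvPairs (edges : List (Int × Int)) : List (Int × Int) :=
  edges.flatMap (fun e => [(e.1, e.2), (e.2, e.1)])

-- the vertices A's DFS actually calls: closure of {vert} under "neighbor whose first
-- visited_vertex entry is False" (a called vertex is marked True on entry, so only
-- initially-False neighbors are ever recursed into)
def pvStep (edges : List (Int × Int)) (visited : List (Int × Bool)) (S : List Int) : List Int :=
  S ++ (pvPairs edges).filterMap
    (fun p => if p.1 ∈ S ∧ List.lookup p.2 visited = some false ∧ p.2 ∉ S then some p.2 else none)

def pvCalled (edges : List (Int × Int)) (vert : Int) (visited : List (Int × Bool)) : List Int :=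
  (pvStep edges visited)^[2 * edges.length + 1] [vert]

-- Pre_ holds exactly where Python A returns normally: at every vertex its DFS calls there is
-- no incident self-loop (else IndexError on tup[0]) and every neighbor is vert or a key of
-- visited_vertex (else KeyError).
def Pre_reachable_alg (edges : List (Int × Int)) (vert : Int) (visited_vertex : List (Int × Bool)) : Prop :=
  ∀ v ∈ pvCalled edges vert visited_vertex, ∀ p ∈ edges, (p.1 = v ∨ p.2 = v) →
    p.1 ≠ p.2 ∧ (p.1 = v → p.2 = vert ∨ p.2 ∈ visited_vertex.map Prod.fst)
             ∧ (p.2 = v → p.1 = vert ∨ p.1 ∈ visited_vertex.map Prod.fst)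
instance (edges : List (Int × Int)) (vert : Int) (visited_vertex : List (Int × Bool)) : Decidable (Pre_reachable_alg edges vert visited_vertex) := by unfold Pre_reachable_alg; infer_instance

def pvWitness_reachable_alg : (List (Int × Int)) × Int × (List (Int × Bool)) :=
  ([(1, 2), (2, 3)], 1, [(1, false), (2, false), (3, false)])

def Spec_reachable_alg (edges : List (Int × Int)) (vert : Int) (visited_vertex : List (Int × Bool)) (out : List Int) : Prop := out = reachable_alg_alt edges vert visited_vertex
instance (edges : List (Int × Int)) (vert : Int) (visited_vertex : List (Int × Bool)) (out : List Int) : Decidable (Spec_reachable_alg edges vert visited_vertex out) := by unfold Spec_reachable_alg; infer_instance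

-- ===== CLAIM (what is proved, stated in full; the proofs are below) =====
def Claim_equal_reachable_alg : Prop := ∀ (edges : List (Int × Int)) (vert : Int) (visited_vertex : List (Int × Bool)), Dom_reachable_alg edges vert visited_vertex → Pre_reachable_alg edges vert visited_vertex → Spec_reachable_alg edges vert visited_vertex (reachable_alg edges vert visited_vertex)

-- ===== LEMMAS AND PROOFS =====

-- the neighbors of v in edge order (as the adjacency dict will list them)
def pvNbrs (edges : List (Int × Int)) (v : Int) : List Int :=
  edges.flatMap (fun e => (if e.1 = v then [e.2] else []) ++ (if e.2 = v then [e.1] else []))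

-- ---- step 1: A's edge scan at a vertex is the scan of that vertex's neighbor list ----

-- a fold preserves any invariant its step preserves
lemma pvFoldInv {α β : Type} (P : β → Prop) (f : β → α → β)
    (hf : ∀ st x, P st → P (f st x)) : ∀ (l : List α) (st : β), P st → P (l.foldl f st) := by
  intro l
  induction l with
  | nil => intro st h; exact h
  | cons x xs ih => intro st h; exact ih _ (hf st x h)

-- body of the per-neighbor scan shared by the intermediate forms (proof-only)
def pvBodyS (rec : Int → PySem.Dict Int Bool → List Int × PySem.Dict Int Bool)
    (st : List Int × PySem.Dict Int Bool) (n : Int) : List Int × PySem.Dict Int Bool :=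
  match st.2.get? n with
  | none => st
  | some b =>
    if b = false then
      let p := rec n st.2
      (st.1 ++ p.1, p.2)
    else st

-- A's recursion rewritten over neighbor lists (proof-only intermediate)
def pvDfsD : Nat → List (Int × Int) → Int → PySem.Dict Int Bool → List Int × PySem.Dict Int Bool
  | 0, _, _, vis => ([], vis)
  | fuel+1, edges, vert, vis =>
    (pvNbrs edges vert).foldl (pvBodyS (pvDfsD fuel edges)) ([vert], vis.insert vert true)

-- A's loop body only inserts `true` into the dict
lemma pvBodyA_preserve (rec : Int → PySem.Dict Int Bool → List Int × PySem.Dict Int Bool)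
    (vert k : Int) (hrec : ∀ n d, d.get? k = some true → (rec n d).2.get? k = some true)
    (st : List Int × PySem.Dict Int Bool) (e : Int × Int)
    (h : st.2.get? k = some true) : (pvBodyA rec vert st e).2.get? k = some true := by
  unfold pvBodyA
  split
  · split
    · exact h
    · split
      · exact h
      · split
        · exact hrec _ st.2 h
        · exact h
  · exact h

-- once a key is mapped to true it stays true through the whole DFS
lemma pvTrueMonoA : ∀ (fuel : Nat) (edges : List (Int × Int)) (n : Int)
    (d : PySem.Dict Int Bool) (k : Int), d.get? k = some true →
    ((reachableA fuel edges n d).2).get? k = some true := by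
  intro fuel
  induction fuel with
  | zero => intro edges n d k h; exact h
  | succ fuel ih =>
    intro edges n d k h
    simp only [reachableA]
    refine pvFoldInv (fun st : List Int × PySem.Dict Int Bool => st.2.get? k = some true) _
      (pvBodyA_preserve _ _ _ (fun n d hd => ih edges n d k hd)) edges _ ?_
    by_cases hk : k = n
    · subst hk; exact PySem.Dict.get?_insert_self d k true
    · show (d.insert n true).get? k = some true
      rw [PySem.Dict.get?_insert_of_ne d true hk]; exact h

-- at a vertex already mapped to true, A's per-edge body is the per-neighbor body
-- over that edge's neighbor contribution
lemma pvBodyA_eq (rec : Int → PySem.Dict Int Bool → List Int × PySem.Dict Int Bool)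
    (vert : Int) (st : List Int × PySem.Dict Int Bool) (e : Int × Int)
    (hst : st.2.get? vert = some true) :
    pvBodyA rec vert st e
      = ((if e.1 = vert then [e.2] else []) ++ (if e.2 = vert then [e.1] else [])).foldl
          (pvBodyS rec) st := by
  by_cases h1 : e.1 = vert <;> by_cases h2 : e.2 = vert
  · -- self-loop at vert: A skips it (empty tuple); the neighbor scan reads vert twice, true, skips
    simp [pvBodyA, pvBodyS, pvTup, h1, h2, PySem.List.pyGet?, PySem.List.pyIdx?, hst]
  · simp [pvBodyA, pvBodyS, pvTup, h1, h2, PySem.List.pyGet?, PySem.List.pyIdx?]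
  · simp [pvBodyA, pvBodyS, pvTup, h1, h2, PySem.List.pyGet?, PySem.List.pyIdx?]
  · simp [pvBodyA, h1, h2]

-- A's scan of all edges at vertex `vert` is the scan of vert's neighbor list
lemma pvFoldA_eq_nbrs (fuel : Nat) (allE : List (Int × Int)) (vert : Int) :
    ∀ (edges : List (Int × Int)) (st : List Int × PySem.Dict Int Bool),
      st.2.get? vert = some true →
      edges.foldl (pvBodyA (reachableA fuel allE) vert) st
        = (pvNbrs edges vert).foldl (pvBodyS (reachableA fuel allE)) st := by
  intro edges
  induction edges with
  | nil => intro st _; rfl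
  | cons e rest ih =>
    intro st hst
    have hnb : pvNbrs (e :: rest) vert
        = ((if e.1 = vert then [e.2] else []) ++ (if e.2 = vert then [e.1] else []))
            ++ pvNbrs rest vert := by
      simp [pvNbrs]
    have hst' : (pvBodyA (reachableA fuel allE) vert st e).2.get? vert = some true :=
      pvBodyA_preserve _ _ _ (fun n d hd => pvTrueMonoA fuel allE n d vert hd) st e hst
    rw [List.foldl_cons, hnb, List.foldl_append, ih _ hst',
      pvBodyA_eq _ _ _ _ hst]

-- A equals the neighbor-list recursion, fuel for fuel
lemma pvA_eq_dfsD (edges : List (Int × Int)) :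
    ∀ (fuel : Nat) (v : Int) (vis : PySem.Dict Int Bool),
      reachableA fuel edges v vis = pvDfsD fuel edges v vis := by
  intro fuel
  induction fuel with
  | zero => intro v vis; rfl
  | succ fuel ih =>
    intro v vis
    have hfun : pvBodyS (reachableA fuel edges) = pvBodyS (pvDfsD fuel edges) := by
      funext st n
      unfold pvBodyS
      simp only [ih]
    simp only [reachableA, pvDfsD]
    rw [pvFoldA_eq_nbrs fuel edges v edges _ (PySem.Dict.get?_insert_self vis v true), hfun]

-- ---- step 2: abstract the dict to the finite set of its False keys ----

-- availability set abstraction: s holds exactly the keys the dict maps to false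
def pvRel (d : PySem.Dict Int Bool) (s : Finset Int) : Prop :=
  ∀ k, d.get? k = some false ↔ k ∈ s

-- fueled DFS over availability sets (proof-only)
def pvDfsS (edges : List (Int × Int)) : Nat → Int → Finset Int → List Int × Finset Int
  | 0, _, s => ([], s)
  | f+1, v, s =>
    (pvNbrs edges v).foldl
      (fun st n => if n ∈ st.2 then (st.1 ++ (pvDfsS edges f n st.2).1, (pvDfsS edges f n st.2).2) else st)
      ([v], s.erase v)

def pvStepS (edges : List (Int × Int)) (f : Nat)
    (st : List Int × Finset Int) (n : Int) : List Int × Finset Int :=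
  if n ∈ st.2 then (st.1 ++ (pvDfsS edges f n st.2).1, (pvDfsS edges f n st.2).2) else st

lemma pvDfsS_succ (edges : List (Int × Int)) (f : Nat) (v : Int) (s : Finset Int) :
    pvDfsS edges (f+1) v s = (pvNbrs edges v).foldl (pvStepS edges f) ([v], s.erase v) := rfl

-- relation transported through one insert/erase
lemma pvRel_insert (d : PySem.Dict Int Bool) (s : Finset Int) (h : pvRel d s) (v : Int) :
    pvRel (d.insert v true) (s.erase v) := by
  intro k
  rw [PySem.Dict.get?_insert, Finset.mem_erase]
  by_cases hk : k = v <;> simp [hk, h k]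

-- the dict recursion and the set recursion agree (outputs and abstracted state)
lemma pvD_to_S (edges : List (Int × Int)) :
    ∀ (f : Nat) (v : Int) (d : PySem.Dict Int Bool) (s : Finset Int), pvRel d s →
      (pvDfsD f edges v d).1 = (pvDfsS edges f v s).1
      ∧ pvRel (pvDfsD f edges v d).2 (pvDfsS edges f v s).2 := by
  intro f
  induction f with
  | zero => intro v d s h; exact ⟨rfl, h⟩
  | succ f ih =>
    intro v d s h
    rw [pvDfsS_succ]
    simp only [pvDfsD]
    -- paired fold over the same neighbor list
    have : ∀ (l : List Int) (st1 : List Int × PySem.Dict Int Bool) (st2 : List Int × Finset Int),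
        st1.1 = st2.1 → pvRel st1.2 st2.2 →
        (l.foldl (pvBodyS (pvDfsD f edges)) st1).1 = (l.foldl (pvStepS edges f) st2).1
        ∧ pvRel (l.foldl (pvBodyS (pvDfsD f edges)) st1).2 (l.foldl (pvStepS edges f) st2).2 := by
      intro l
      induction l with
      | nil => intro st1 st2 h1 h2; exact ⟨h1, h2⟩
      | cons n l ihl =>
        intro st1 st2 h1 h2
        rw [List.foldl_cons, List.foldl_cons]
        by_cases hn : n ∈ st2.2
        · have hd : st1.2.get? n = some false := (h2 n).mpr hn
          have hrec := ih n st1.2 st2.2 h2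
          refine ihl _ _ ?_ ?_
          · simp [pvBodyS, pvStepS, hd, hn, h1, hrec.1]
          · simp only [pvBodyS, pvStepS, hd, if_pos hn]
            exact hrec.2
        · have hd : ∀ b, st1.2.get? n = some b → b = true := by
            intro b hb
            cases b
            · exact absurd ((h2 n).mp hb) hn
            · rfl
          have hskip : pvBodyS (pvDfsD f edges) st1 n = st1 := by
            unfold pvBodyS
            cases hg : st1.2.get? n with
            | none => rfl
            | some b => simp [hd b hg]
          rw [hskip]
          refine ihl _ _ ?_ ?_ <;> simp [pvStepS, hn, h1, h2]
    exact this (pvNbrs edges v) _ _ rfl (pvRel_insert d s h v)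

-- ---- step 3: the set recursion flattens to the fuel-free stack loop ----

-- fuel-free stack DFS over availability sets (proof-only ideal form)
def pvLoopW (edges : List (Int × Int)) : List Int → Finset Int → List Int
  | [], _ => []
  | v :: rest, s =>
    if _h : v ∈ s then v :: pvLoopW edges (pvNbrs edges v ++ rest) (s.erase v)
    else pvLoopW edges rest s
termination_by pending s => (s.card, pending.length)
decreasing_by
  · exact Prod.Lex.left _ _ (Finset.card_erase_lt_of_mem _h)
  · exact Prod.Lex.right _ (by simp)

def pvFoldS (edges : List (Int × Int)) (f : Nat) (ns : List Int) (s : Finset Int) :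
    List Int × Finset Int :=
  ns.foldl (pvStepS edges f) ([], s)

-- output accumulates on the left of the fold
lemma pvFoldS_append (edges : List (Int × Int)) (f : Nat) :
    ∀ (l : List Int) (a : List Int) (s : Finset Int),
      l.foldl (pvStepS edges f) (a, s)
        = (a ++ (pvFoldS edges f l s).1, (pvFoldS edges f l s).2) := by
  intro l
  induction l with
  | nil => intro a s; simp [pvFoldS]
  | cons n l ih =>
    intro a s
    simp only [pvFoldS, List.foldl_cons]
    by_cases hn : n ∈ s
    · simp only [pvStepS, hn, if_pos]
      rw [ih (a ++ (pvDfsS edges f n s).1) (pvDfsS edges f n s).2,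
        ih ([] ++ (pvDfsS edges f n s).1) (pvDfsS edges f n s).2]
      simp
    · simp only [pvStepS, hn, ite_false]
      exact ih a s

lemma pvDfsS_succ' (edges : List (Int × Int)) (f : Nat) (v : Int) (s : Finset Int) :
    pvDfsS edges (f+1) v s
      = (v :: (pvFoldS edges f (pvNbrs edges v) (s.erase v)).1,
         (pvFoldS edges f (pvNbrs edges v) (s.erase v)).2) := by
  rw [pvDfsS_succ, pvFoldS_append]
  rfl

-- the availability set only shrinks
lemma pvFold_sub (edges : List (Int × Int)) (f : Nat)
    (h : ∀ v s, (pvDfsS edges f v s).2 ⊆ s) :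
    ∀ (l : List Int) (st : List Int × Finset Int), (l.foldl (pvStepS edges f) st).2 ⊆ st.2 := by
  intro l
  induction l with
  | nil => intro st; exact fun x hx => hx
  | cons n l ih =>
    intro st
    rw [List.foldl_cons]
    refine subset_trans (ih _) ?_
    unfold pvStepS
    split
    · exact h n st.2
    · exact fun x hx => hx

lemma pvDfsS_sub (edges : List (Int × Int)) :
    ∀ (f : Nat) (v : Int) (s : Finset Int), (pvDfsS edges f v s).2 ⊆ s := by
  intro f
  induction f with
  | zero => intro v s; exact fun x hx => hx
  | succ f ih =>
    intro v s
    rw [pvDfsS_succ]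
    refine subset_trans (pvFold_sub edges f ih _ _) ?_
    exact Finset.erase_subset _ _

-- main bridge: the stack loop processes a pending block exactly as the fueled fold does
lemma pvK (edges : List (Int × Int)) :
    ∀ (N : Nat) (s : Finset Int), s.card ≤ N →
      ∀ (ns : List Int) (f : Nat) (rest : List Int), s.card ≤ f →
        pvLoopW edges (ns ++ rest) s
          = (pvFoldS edges f ns s).1 ++ pvLoopW edges rest (pvFoldS edges f ns s).2 := by
  intro N
  induction N with
  | zero =>
    intro s hs ns
    induction ns with
    | nil => intro f rest _; simp [pvFoldS]
    | cons n ns ih =>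
      intro f rest hf
      have hn : n ∉ s := by
        intro hmem
        have := Finset.card_pos.mpr ⟨n, hmem⟩
        omega
      have h1 : pvLoopW edges ((n :: ns) ++ rest) s = pvLoopW edges (ns ++ rest) s := by
        rw [List.cons_append, pvLoopW, dif_neg hn]
      have h2 : pvFoldS edges f (n :: ns) s = pvFoldS edges f ns s := by
        simp [pvFoldS, pvStepS, hn]
      rw [h1, h2, ih f rest hf]
  | succ N ihN =>
    intro s hs ns
    induction ns with
    | nil => intro f rest _; simp [pvFoldS]
    | cons n ns ih =>
      intro f rest hf
      by_cases hn : n ∈ s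
      · have hcard : 0 < s.card := Finset.card_pos.mpr ⟨n, hn⟩
        obtain ⟨f', rfl⟩ : ∃ f', f = f' + 1 := ⟨f - 1, by omega⟩
        set F1 := pvFoldS edges f' (pvNbrs edges n) (s.erase n) with hF1
        have hcard_er : (s.erase n).card ≤ N := by
          have := Finset.card_erase_lt_of_mem hn; omega
        have hcard_er_f : (s.erase n).card ≤ f' := by
          have := Finset.card_erase_lt_of_mem hn; omega
        -- LHS
        have hL : pvLoopW edges ((n :: ns) ++ rest) s
            = n :: (F1.1 ++ pvLoopW edges (ns ++ rest) F1.2) := by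
          rw [List.cons_append, pvLoopW, dif_pos hn,
            ihN (s.erase n) hcard_er (pvNbrs edges n) f' (ns ++ rest) hcard_er_f]
        have hF1sub : F1.2 ⊆ s.erase n := pvFold_sub edges f' (pvDfsS_sub edges f') _ _
        have hF1card : F1.2.card ≤ N := le_trans (Finset.card_le_card hF1sub) hcard_er
        have hF1cardf : F1.2.card ≤ f' + 1 := by
          have := le_trans (Finset.card_le_card hF1sub) (le_of_lt (Finset.card_erase_lt_of_mem hn))
          omega
        have hL2 : pvLoopW edges (ns ++ rest) F1.2
            = (pvFoldS edges (f'+1) ns F1.2).1 ++ pvLoopW edges rest (pvFoldS edges (f'+1) ns F1.2).2 :=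
          ihN F1.2 hF1card ns (f'+1) rest hF1cardf
        -- RHS
        have hR : pvFoldS edges (f'+1) (n :: ns) s
            = ((n :: F1.1) ++ (pvFoldS edges (f'+1) ns F1.2).1, (pvFoldS edges (f'+1) ns F1.2).2) := by
          simp only [pvFoldS, List.foldl_cons, pvStepS, if_pos hn, List.nil_append]
          rw [pvDfsS_succ' edges f' n s]
          exact pvFoldS_append edges (f'+1) ns (n :: F1.1) F1.2
        rw [hL, hL2, hR]
        simp
      · have h1 : pvLoopW edges ((n :: ns) ++ rest) s = pvLoopW edges (ns ++ rest) s := by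
          rw [List.cons_append, pvLoopW, dif_neg hn]
        have h2 : pvFoldS edges f (n :: ns) s = pvFoldS edges f ns s := by
          simp [pvFoldS, pvStepS, hn]
        rw [h1, h2, ih f rest hf]

-- ---- step 4: the adjacency dict reproduces the neighbor lists ----

-- the two modifies per edge are one modify per directed pair
lemma pvAdj_eq_pairs_fold (edges : List (Int × Int)) :
    ∀ (d : PySem.Dict Int (List Int)),
      edges.foldl (fun d e => (d.modify e.1 [] (· ++ [e.2])).modify e.2 [] (· ++ [e.1])) d
        = (pvPairs edges).foldl (fun d p => d.modify p.1 [] (· ++ [p.2])) d := by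
  induction edges with
  | nil => intro d; rfl
  | cons e rest ih =>
    intro d
    simp only [pvPairs, List.flatMap_cons, List.foldl_cons, List.foldl_append]
    exact ih _

lemma pvAdj_getD (edges : List (Int × Int)) (v : Int) :
    (pvAdj edges).getD v [] = pvNbrs edges v := by
  unfold pvAdj
  rw [pvAdj_eq_pairs_fold, PySem.Dict.getD_foldl_modify_append]
  simp only [PySem.Dict.getD_empty, List.nil_append, pvNbrs, pvPairs]
  induction edges with
  | nil => rfl
  | cons e rest ih =>
    simp only [List.flatMap_cons, List.filter_append, List.map_append, ih]
    congr 1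
    by_cases h1 : e.1 = v <;> by_cases h2 : e.2 = v <;> simp [h1, h2]

-- ---- step 5: the port's fueled loop over a PySem.Set is the fuel-free loop ----

def pvRel2 (t : PySem.Set Int) (s : Finset Int) : Prop := ∀ k, k ∈ t ↔ k ∈ s

lemma pvLoop_cons_skip (adj : PySem.Dict Int (List Int)) (fuel : Nat) (v : Int)
    (rest : List Int) (t : PySem.Set Int) (h : t.contains v = false) :
    pvLoop adj fuel (v :: rest) t = pvLoop adj fuel rest t := by
  have h' : v ∉ t := by rw [← PySem.Set.contains_iff, h]; exact Bool.false_ne_true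
  cases fuel <;> simp [pvLoop, h']

lemma pvLoop_cons_visit (adj : PySem.Dict Int (List Int)) (f : Nat) (v : Int)
    (rest : List Int) (t : PySem.Set Int) (h : t.contains v = true) :
    pvLoop adj (f+1) (v :: rest) t = v :: pvLoop adj f (adj.getD v [] ++ rest) (t.discard v) := by
  have h' : v ∈ t := (PySem.Set.contains_iff t v).mp h
  simp [pvLoop, h']

lemma pvLoop_eq_loopW (edges : List (Int × Int)) :
    ∀ (N : Nat) (s : Finset Int), s.card ≤ N →
      ∀ (pending : List Int) (fuel : Nat) (t : PySem.Set Int), pvRel2 t s → s.card ≤ fuel →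
        pvLoop (pvAdj edges) fuel pending t = pvLoopW edges pending s := by
  intro N
  induction N with
  | zero =>
    intro s hs pending
    induction pending with
    | nil => intro fuel t _ _; rw [pvLoopW, pvLoop.eq_1]
    | cons v rest ih =>
      intro fuel t ht hf
      have hv : v ∉ s := by
        intro hmem
        have := Finset.card_pos.mpr ⟨v, hmem⟩
        omega
      have hc : t.contains v = false := by
        rw [← Bool.not_eq_true, PySem.Set.contains_iff]
        exact fun hm => hv ((ht v).mp hm)
      rw [pvLoop_cons_skip _ _ _ _ _ hc, pvLoopW, dif_neg hv]
      exact ih fuel t ht hf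
  | succ N ihN =>
    intro s hs pending
    induction pending with
    | nil => intro fuel t _ _; rw [pvLoopW, pvLoop.eq_1]
    | cons v rest ih =>
      intro fuel t ht hf
      by_cases hv : v ∈ s
      · have hcard : 0 < s.card := Finset.card_pos.mpr ⟨v, hv⟩
        obtain ⟨f', rfl⟩ : ∃ f', fuel = f' + 1 := ⟨fuel - 1, by omega⟩
        have hc : t.contains v = true := PySem.Set.contains_iff t v |>.mpr ((ht v).mpr hv)
        have hrel : pvRel2 (t.discard v) (s.erase v) := by
          intro k
          rw [PySem.Set.mem_discard, Finset.mem_erase]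
          constructor
          · rintro ⟨hk, hne⟩; exact ⟨hne, (ht k).mp hk⟩
          · rintro ⟨hne, hk⟩; exact ⟨(ht k).mpr hk, hne⟩
        have hcard_er : (s.erase v).card ≤ N := by
          have := Finset.card_erase_lt_of_mem hv; omega
        have hcard_er_f : (s.erase v).card ≤ f' := by
          have := Finset.card_erase_lt_of_mem hv; omega
        rw [pvLoop_cons_visit _ _ _ _ _ hc, pvLoopW, dif_pos hv, pvAdj_getD edges v]
        exact congrArg (v :: ·)
          (ihN (s.erase v) hcard_er (pvNbrs edges v ++ rest) f' (t.discard v) hrel hcard_er_f)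
      · have hc : t.contains v = false := by
          rw [← Bool.not_eq_true, PySem.Set.contains_iff]
          exact fun hm => hv ((ht v).mp hm)
        rw [pvLoop_cons_skip _ _ _ _ _ hc, pvLoopW, dif_neg hv]
        exact ih fuel t ht hf

-- ---- step 6: initial states line up ----

-- the finite set of keys the initial dict maps to false
def pvS0 (visited_vertex : List (Int × Bool)) : Finset Int :=
  ((((PySem.Dict.ofList visited_vertex).items.filter (fun kv => !kv.2)).map Prod.fst)).toFinset

lemma pvRel_init (visited_vertex : List (Int × Bool)) :
    pvRel (PySem.Dict.ofList visited_vertex) (pvS0 visited_vertex) := by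
  intro k
  simp only [pvS0, List.mem_toFinset, List.mem_map, List.mem_filter]
  rw [PySem.Dict.get?_eq_some_iff_mem_items _ _ _ (PySem.Dict.nodup_keys_ofList _)]
  constructor
  · intro h; exact ⟨(k, false), ⟨h, rfl⟩, rfl⟩
  · rintro ⟨⟨k', b⟩, ⟨hm, hb⟩, rfl⟩
    cases b
    · exact hm
    · simp at hb

lemma pvRel2_init (visited_vertex : List (Int × Bool)) (vert : Int) :
    pvRel2 (pvAvail visited_vertex vert) (insert vert (pvS0 visited_vertex)) := by
  intro k
  simp only [pvAvail, pvS0, PySem.Set.mem_add, PySem.Set.mem_ofList, List.mem_toFinset,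
    Finset.mem_insert]
  tauto

lemma pvSize_foldl_insert_le (l : List (Int × Bool)) :
    ∀ (d : PySem.Dict Int Bool),
      (l.foldl (fun acc p => acc.insert p.1 p.2) d).size ≤ d.size + l.length := by
  induction l with
  | nil => intro d; simp
  | cons p l ih =>
    intro d
    rw [List.foldl_cons]
    refine le_trans (ih _) ?_
    rw [PySem.Dict.size_insert]
    split
    · simp
    · simp only [List.length_cons]
      omega

lemma pvS0_card (visited_vertex : List (Int × Bool)) :
    (pvS0 visited_vertex).card ≤ visited_vertex.length := by
  refine le_trans (List.toFinset_card_le _) ?_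
  rw [List.length_map]
  refine le_trans (List.length_filter_le _ _) ?_
  have h := pvSize_foldl_insert_le visited_vertex PySem.Dict.empty
  have h0 : (PySem.Dict.empty : PySem.Dict Int Bool).size = 0 := PySem.Dict.size_empty
  simp only [PySem.Dict.size] at h h0
  simpa [PySem.Dict.ofList, PySem.Dict.update, h0] using h

-- ===== VERDICT (by name: the statement is the Claim_ definition above) =====
theorem reachable_alg_spec : Claim_equal_reachable_alg := by
  intro edges vert visited _ _
  show reachable_alg edges vert visited = reachable_alg_alt edges vert visited
  unfold reachable_alg reachable_alg_alt
  have hcard := pvS0_card visited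
  set s0 := pvS0 visited with hs0
  set F := pvFoldS edges (visited.length + edges.length + 1) (pvNbrs edges vert) (s0.erase vert)
    with hF
  -- A side
  have hA : (reachableA (visited.length + edges.length + 2) edges vert
      (PySem.Dict.ofList visited)).1 = vert :: F.1 := by
    rw [pvA_eq_dfsD,
      (pvD_to_S edges (visited.length + edges.length + 2) vert _ s0 (pvRel_init visited)).1]
    have : visited.length + edges.length + 2 = (visited.length + edges.length + 1) + 1 := by omega
    rw [this, pvDfsS_succ']
  -- B side
  have hcard_ins : (insert vert s0).card ≤ visited.length + 1 :=
    le_trans (Finset.card_insert_le _ _) (by omega)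
  have hB : pvLoop (pvAdj edges) (visited.length + 2) [vert] (pvAvail visited vert)
      = vert :: F.1 := by
    rw [pvLoop_eq_loopW edges (visited.length + 1) (insert vert s0) hcard_ins [vert]
      (visited.length + 2) (pvAvail visited vert) (pvRel2_init visited vert) (by omega)]
    rw [pvLoopW, dif_pos (Finset.mem_insert_self vert s0), Finset.erase_insert_eq_erase]
    have hcard_er : (s0.erase vert).card ≤ visited.length :=
      le_trans (Finset.card_le_card (Finset.erase_subset _ _)) hcard
    rw [pvK edges visited.length (s0.erase vert) hcard_er (pvNbrs edges vert)
      (visited.length + edges.length + 1) [] (by omega)]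
    rw [pvLoopW, List.append_nil, ← hF]
  rw [hA, hB]
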